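-- pv_equiv track=rewrite | github.com/reilost/appspider | appspider/spiders/wenshucourt/wenshucore.py | StrToLong
-- ===== SOURCE A (Python) =====
-- def StrToLong(s, i):
--     v10 = i
--     v4 = v10
--     v7 = 1
--     v6 = len(s)
--     while v7 < v6:
--         v4 += (v10 + v7 + (ord(s[v7]) << (v7 & 7)) - ord(s[v7]))
--         v7 += 1
--     return v4
-- ===== SOURCE B (Python) =====
-- def StrToLong(s, i):
--     n = len(s)
--     m = n - 1 if n > 0 else 0
--     total = i + i * m + m * (m + 1) // 2
--     for r in range(1, 8):
--         w = (1 << r) - 1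
--         total += w * sum(ord(s[j]) for j in range(r, n, 8))
--     return total
-- ===== Notes on version B (the rewrite author's own statement) =====
-- stated objective: faster
-- what changed: A accumulates i, the index and the shifted-char term inside one index loop; B computes the arithmetic part in closed form and replaces the per-index loop by seven strided passes (range(r, n, 8)), one per index-residue class mod 8, summing raw character codes per class and applying each class weight (1<<r)-1 once.
import Mathlib
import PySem

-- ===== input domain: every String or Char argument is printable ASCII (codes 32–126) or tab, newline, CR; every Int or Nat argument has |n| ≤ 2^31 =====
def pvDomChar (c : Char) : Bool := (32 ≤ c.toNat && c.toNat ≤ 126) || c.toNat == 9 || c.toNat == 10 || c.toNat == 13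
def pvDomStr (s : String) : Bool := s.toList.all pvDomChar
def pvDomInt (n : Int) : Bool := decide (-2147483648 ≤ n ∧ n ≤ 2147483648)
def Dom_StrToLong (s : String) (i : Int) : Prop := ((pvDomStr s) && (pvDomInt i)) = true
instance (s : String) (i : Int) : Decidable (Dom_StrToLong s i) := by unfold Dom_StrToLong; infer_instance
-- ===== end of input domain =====

-- B replaces A's single index loop by a closed-form arithmetic part plus seven strided
-- passes, one per index-residue class mod 8, since the shift amount depends only on the
-- index mod 8 (objective: alternative decomposition, bucketed by residue class).

-- ===== PORT A =====
-- A's while loop over index v7 = 1 .. len(s)-1; the index is always in range, so the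
-- pyGetD default ' ' is never used.
def StrToLong (s : String) (i : Int) : Int :=
  let v10 := i
  let v6 : Int := PySem.List.len s.toList
  (PySem.List.pyRange 1 v6 1).foldl
    (fun v4 v7 =>
      let c : Int := ((PySem.List.pyGetD s.toList v7 ' ').toNat : Int)
      v4 + (v10 + v7 + (c <<< (PySem.Int.band v7 7).toNat) - c))
    v10

-- ===== PORT B =====
-- B: arithmetic part in closed form, then for each residue r = 1..7 one strided pass
-- range(r, n, 8) summing the character codes of that class, weighted by (1<<r)-1.
def StrToLong_alt (s : String) (i : Int) : Int :=
  let n : Int := PySem.List.len s.toList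
  let m : Int := if n > 0 then n - 1 else 0
  let total : Int := i + i * m + PySem.Int.floordiv (m * (m + 1)) 2
  (PySem.List.pyRange 1 8 1).foldl
    (fun total r =>
      let w : Int := ((1 : Int) <<< r.toNat) - 1
      total + w * ((PySem.List.pyRange r n 8).map
        (fun j => ((PySem.List.pyGetD s.toList j ' ').toNat : Int))).sum)
    total

-- ===== PRECONDITION & SPEC =====
def Spec_StrToLong (s : String) (i : Int) (out : Int) : Prop := out = StrToLong_alt s i
instance (s : String) (i : Int) (out : Int) : Decidable (Spec_StrToLong s i out) := by unfold Spec_StrToLong; infer_instance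

-- ===== CLAIM (what is proved, stated in full; the proofs are below) =====
def Claim_equal_StrToLong : Prop := ∀ (s : String) (i : Int), Dom_StrToLong s i → Spec_StrToLong s i (StrToLong s i)

-- ===== LEMMAS AND PROOFS =====

-- the character code at index j
def pvOrd (l : List Char) (j : Int) : Int := ((PySem.List.pyGetD l j ' ').toNat : Int)

-- the weight attached to a residue class r (0 ≤ r < 8)
def pvW (r : Int) : Int := ((1 : Int) <<< r.toNat) - 1

-- the per-character contribution of index j in A's loop
def pvH (l : List Char) (j : Int) : Int := pvOrd l j * pvW (j % 8)

-- Python j & 7 is j % 8 for nonnegative j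
lemma pv_band7 (j : Int) (h : 0 ≤ j) : PySem.Int.band j 7 = j % 8 := by
  simp only [PySem.Int.band, if_pos h, if_pos (by norm_num : (0:Int) ≤ 7)]
  have : j.toNat &&& Int.toNat 7 = j.toNat % 8 := Nat.and_two_pow_sub_one_eq_mod j.toNat 3
  rw [this]; omega

-- Gauss sum over the index range 1..m
lemma pv_gauss (m : Nat) :
    (PySem.List.pyRange 1 ((m : Int) + 1) 1).sum * 2 = (m : Int) * ((m : Int) + 1) := by
  induction m with
  | zero => simp [PySem.List.pyRange_one_eq_nil]
  | succ t ih =>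
    push_cast
    rw [PySem.List.pyRange_one_succ_right (by omega)]
    rw [List.sum_append, List.sum_cons, List.sum_nil]
    linarith [ih]

-- A's result: closed-form arithmetic part plus the sum of pvH over indices 1..n-1
lemma pv_A_eq (s : String) (i : Int) :
    StrToLong s i
      = (let n : Int := (s.toList.length : Int)
         let m : Int := if n > 0 then n - 1 else 0
         i + i * m + PySem.Int.floordiv (m * (m + 1)) 2)
        + ((PySem.List.pyRange 1 (s.toList.length : Int) 1).map (pvH s.toList)).sum := by
  unfold StrToLong
  simp only [PySem.List.len_eq]
  rw [PySem.List.foldl_congr_mem _ _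
    (fun v4 v7 => v4 + ((i + v7) + pvH s.toList v7)) i
    (by
      intro acc x hx
      have hx1 := (PySem.List.mem_pyRange_one.mp hx).1
      rw [pv_band7 x (by omega)]
      simp only [pvH, pvOrd, pvW, Int.shiftLeft_eq]
      ring)]
  rw [PySem.List.foldl_add]
  have hsplit : ((PySem.List.pyRange 1 (s.toList.length : Int) 1).map
      (fun j => (i + j) + pvH s.toList j)).sum
      = ((PySem.List.pyRange 1 (s.toList.length : Int) 1).map (fun j => i + j)).sum
        + ((PySem.List.pyRange 1 (s.toList.length : Int) 1).map (pvH s.toList)).sum :=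
    PySem.List.sum_map_add_int _ _ _
  rw [hsplit]
  have harith : ((PySem.List.pyRange 1 (s.toList.length : Int) 1).map (fun j => i + j)).sum
      = (let n : Int := (s.toList.length : Int)
         let m : Int := if n > 0 then n - 1 else 0
         i * m + PySem.Int.floordiv (m * (m + 1)) 2) := by
    have h2 : ((PySem.List.pyRange 1 (s.toList.length : Int) 1).map (fun j => i + j)).sum
        = ((PySem.List.pyRange 1 (s.toList.length : Int) 1).map (fun _ => i)).sum
          + ((PySem.List.pyRange 1 (s.toList.length : Int) 1).map (fun j => j)).sum :=
      PySem.List.sum_map_add_int _ _ _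
    rw [h2, PySem.List.sum_map_const_int, List.map_id', PySem.List.length_pyRange_one]
    rcases Nat.eq_zero_or_pos s.toList.length with h0 | hpos
    · rw [h0]
      norm_num [PySem.List.pyRange_one_eq_nil, PySem.Int.floordiv]
    · obtain ⟨t, ht⟩ : ∃ t, s.toList.length = t + 1 := ⟨s.toList.length - 1, by omega⟩
      rw [ht]
      push_cast
      have hg := pv_gauss t
      have hif : (if (t : Int) + 1 > 0 then (t : Int) + 1 - 1 else 0) = (t : Int) := by
        rw [if_pos (by positivity)]; ring
      simp only [hif]
      have hlen : (((t : Int) + 1 - 1).toNat : Int) = (t : Int) := by omega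
      rw [hlen]
      have hfd : PySem.Int.floordiv ((t : Int) * ((t : Int) + 1)) 2
          = (PySem.List.pyRange 1 ((t : Int) + 1) 1).sum := by
        simp only [PySem.Int.floordiv]
        rw [← hg]
        exact Int.mul_fdiv_cancel _ (by norm_num)
      rw [hfd]
      ring
  rw [harith]
  ring

-- the strided range for residue r collects exactly the indices 1 ≤ j < n with j % 8 = r
lemma pv_stride_toFinset (n r : Int) (h1 : 1 ≤ r) (h8 : r < 8) :
    (PySem.List.pyRange r n 8).toFinset
      = (Finset.Ico 1 n).filter (fun j => j % 8 = r) := by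
  ext j
  simp only [List.mem_toFinset, Finset.mem_filter, Finset.mem_Ico,
    PySem.List.mem_pyRange_iff_of_pos (by norm_num : (0:Int) < 8)]
  omega

lemma pv_stride_nodup (n r : Int) : (PySem.List.pyRange r n 8).Nodup := by
  rw [PySem.List.pyRange_of_pos r n (by norm_num : (0:Int) < 8)]
  refine List.Nodup.map ?_ List.nodup_range
  intro a b hab
  have hab' : r + 8 * (a : Int) = r + 8 * (b : Int) := hab
  omega

lemma pv_range18_toFinset : (PySem.List.pyRange 1 8 1).toFinset = Finset.Ico (1:Int) 8 := by
  ext j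
  simp only [List.mem_toFinset, Finset.mem_Ico, PySem.List.mem_pyRange_one]

lemma pv_range1n_toFinset (n : Int) :
    (PySem.List.pyRange 1 n 1).toFinset = Finset.Ico (1:Int) n := by
  ext j
  simp only [List.mem_toFinset, Finset.mem_Ico, PySem.List.mem_pyRange_one]

-- partition of A's character sum by index residue class mod 8
lemma pv_partition (l : List Char) :
    ((PySem.List.pyRange 1 (l.length : Int) 1).map (pvH l)).sum
      = ((PySem.List.pyRange 1 8 1).map
          (fun r => pvW r * ((PySem.List.pyRange r (l.length : Int) 8).map (pvOrd l)).sum)).sum := by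
  rw [← List.sum_toFinset _ (PySem.List.nodup_pyRange_one 1 (l.length : Int)),
      ← List.sum_toFinset _ (PySem.List.nodup_pyRange_one 1 8),
      pv_range18_toFinset, pv_range1n_toFinset]
  have hstride : ∀ r ∈ Finset.Ico (1:Int) 8,
      pvW r * ((PySem.List.pyRange r (l.length : Int) 8).map (pvOrd l)).sum
        = ∑ j ∈ (Finset.Ico 1 (l.length : Int)).filter (fun j => j % 8 = r), pvH l j := by
    intro r hr
    obtain ⟨hr1, hr8⟩ := Finset.mem_Ico.mp hr
    rw [← List.sum_toFinset _ (pv_stride_nodup (l.length : Int) r),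
        pv_stride_toFinset _ r hr1 hr8, Finset.mul_sum]
    refine Finset.sum_congr rfl ?_
    intro j hj
    obtain ⟨-, hjr⟩ := Finset.mem_filter.mp hj
    rw [pvH, hjr]
    ring
  rw [Finset.sum_congr rfl hstride]
  have hext : ∑ r ∈ Finset.Ico (1:Int) 8,
        ∑ j ∈ (Finset.Ico 1 (l.length : Int)).filter (fun j => j % 8 = r), pvH l j
      = ∑ r ∈ Finset.Ico (0:Int) 8,
        ∑ j ∈ (Finset.Ico 1 (l.length : Int)).filter (fun j => j % 8 = r), pvH l j := by
    refine Finset.sum_subset ?_ ?_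
    · intro r hr
      simp only [Finset.mem_Ico] at hr ⊢
      omega
    · intro r hr hnr
      have hr0 : r = 0 := by
        simp only [Finset.mem_Ico] at hr hnr
        omega
    -- the r = 0 fiber contributes 0: pvW 0 = 0
      subst hr0
      refine Finset.sum_eq_zero ?_
      intro j hj
      obtain ⟨-, hjr⟩ := Finset.mem_filter.mp hj
      rw [pvH, hjr]
      simp [pvW]
  rw [hext]
  exact (Finset.sum_fiberwise_of_maps_to
    (fun j _ => Finset.mem_Ico.mpr ⟨Int.emod_nonneg j (by norm_num),
      Int.emod_lt_of_pos j (by norm_num)⟩) (pvH l)).symm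

theorem StrToLong_eq_alt (s : String) (i : Int) : StrToLong s i = StrToLong_alt s i := by
  unfold StrToLong_alt
  simp only [PySem.List.len_eq]
  rw [PySem.List.foldl_add]
  rw [pv_A_eq s i]
  have hmap : ((PySem.List.pyRange 1 8 1).map
      (fun r => (((1 : Int) <<< r.toNat) - 1) * ((PySem.List.pyRange r (s.toList.length : Int) 8).map
        (fun j => ((PySem.List.pyGetD s.toList j ' ').toNat : Int))).sum))
      = ((PySem.List.pyRange 1 8 1).map
          (fun r => pvW r * ((PySem.List.pyRange r (s.toList.length : Int) 8).map (pvOrd s.toList)).sum)) := rfl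
  rw [hmap, ← pv_partition s.toList]

-- ===== VERDICT (by name: the statement is the Claim_ definition above) =====
theorem StrToLong_spec : Claim_equal_StrToLong := by
  intro s i _
  unfold Spec_StrToLong
  exact StrToLong_eq_alt s i
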